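-- pv_equiv track=rewrite | github.com/balu100/gmail-variations-generator | gvg.py | generate_dot_suffixes
-- ===== SOURCE A (Python) =====
-- def generate_dot_suffixes(username):
--     """Generate all valid dot suffix variations of a Gmail username systematically."""
--     results = set()
--     n = len(username) - 1  # Number of positions for dots
--     total_combinations = 1 << n  # Total number of combinations (2^n)
--
--     # Generate all combinations using bit masking
--     for mask in range(total_combinations):
--         dotted_username = username[0]  # Start with the first character
--         for i in range(n):
--             if mask & (1 << i):  # Check if the i-th bit is set
--                 dotted_username += "."  # Add a dot
--             dotted_username += username[i + 1]  # Add the next character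
--         results.add(dotted_username)
--
--     return sorted(results)
-- ===== SOURCE B (Python) =====
-- def generate_dot_suffixes(username):
--     """Generate all valid dot suffix variations of a Gmail username systematically."""
--     if not username:
--         raise ValueError("username must be non-empty")
--
--     def variants(s):
--         if len(s) == 1:
--             return {s}
--         rest = variants(s[1:])
--         return {s[0] + r for r in rest} | {s[0] + "." + r for r in rest}
--
--     return sorted(variants(username))
-- ===== Notes on version B (the rewrite author's own statement) =====
-- stated objective: alternative
-- what changed: Replaced the integer bitmask enumeration over range(2**(n-1)) with a structural recursion over the username that builds the variant set by prefixing each shorter variant with or without a dot.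
import Mathlib
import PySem

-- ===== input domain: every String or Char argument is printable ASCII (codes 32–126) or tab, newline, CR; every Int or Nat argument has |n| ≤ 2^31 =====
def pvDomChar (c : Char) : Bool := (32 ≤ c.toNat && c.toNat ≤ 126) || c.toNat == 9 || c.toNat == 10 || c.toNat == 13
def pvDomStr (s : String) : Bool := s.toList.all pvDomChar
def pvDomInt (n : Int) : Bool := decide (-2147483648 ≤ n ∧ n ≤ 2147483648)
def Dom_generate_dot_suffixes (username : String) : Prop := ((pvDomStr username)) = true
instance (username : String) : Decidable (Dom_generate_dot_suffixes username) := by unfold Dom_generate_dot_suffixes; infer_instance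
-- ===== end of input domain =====

-- B replaces A's integer-bitmask enumeration by a structural recursion over the username
-- (prefix each shorter variant with or without a dot); same result, different decomposition.


-- ===== PORT A =====
-- A's inner loop: build the dotted variant selected by `mask` (strings modelled as List Char;
-- the index i+1 is always in range for the loop's i, so getD is exact here).
def gdsBuild (cs : List Char) (mask : Nat) : List Char :=
  (List.range (cs.length - 1)).foldl
    (fun dotted i =>
      (if mask &&& (1 <<< i) != 0 then dotted ++ ['.'] else dotted) ++ [cs.getD (i + 1) ' '])
    (cs.take 1)

def generate_dot_suffixes (username : String) : List String :=
  let cs := username.toList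
  let n := cs.length - 1
  let results : PySem.Set String :=
    (List.range (1 <<< n)).foldl
      (fun res mask => PySem.Set.add res (String.ofList (gdsBuild cs mask))) PySem.Set.empty
  PySem.List.sorted results (fun x => x)

-- ===== PORT B =====
-- B's recursive helper `variants` (strings modelled as List Char; set comprehension/| via PySem.Set).
def gdsVariants : List Char → PySem.Set (List Char)
  | [] => PySem.Set.empty            -- unreachable: Source B raises ValueError before recursing on ""
  | [c] => PySem.Set.ofList [[c]]
  | c :: d :: t =>
      let rest := gdsVariants (d :: t)
      PySem.Set.union (PySem.Set.ofList (rest.map (fun r => c :: r)))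
        (rest.map (fun r => c :: '.' :: r))

def generate_dot_suffixes_alt (username : String) : List String :=
  PySem.List.sorted ((gdsVariants username.toList).map (fun r => String.ofList r)) (fun x => x)

-- ===== PRECONDITION & SPEC =====
-- Pre_ excludes only the empty username, on which A raises ValueError (1 << -1); B also raises there.
def Pre_generate_dot_suffixes (username : String) : Prop := username ≠ ""
instance (username : String) : Decidable (Pre_generate_dot_suffixes username) := by
  unfold Pre_generate_dot_suffixes; infer_instance
def pvWitness_generate_dot_suffixes : String := ("ab")

def Spec_generate_dot_suffixes (username : String) (out : List String) : Prop := out = generate_dot_suffixes_alt username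
instance (username : String) (out : List String) : Decidable (Spec_generate_dot_suffixes username out) := by unfold Spec_generate_dot_suffixes; infer_instance

-- ===== CLAIM (what is proved, stated in full; the proofs are below) =====
def Claim_equal_generate_dot_suffixes : Prop := ∀ (username : String), Dom_generate_dot_suffixes username → Pre_generate_dot_suffixes username → Spec_generate_dot_suffixes username (generate_dot_suffixes username)

-- ===== LEMMAS AND PROOFS =====

-- the Python truthiness test 'mask & (1 << i)' is the i-th bit
theorem gds_bit (m i : Nat) : (m &&& (1 <<< i) != 0) = m.testBit i := by
  simp [Nat.shiftLeft_eq, Nat.and_two_pow]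
  rcases h : m.testBit i <;> simp_all

-- A's loop step only appends; name the appended block and flatten the fold.
theorem gdsBuild_flat (cs : List Char) (mask : Nat) :
    gdsBuild cs mask = cs.take 1 ++ (List.range (cs.length - 1)).flatMap
      (fun i => (if mask &&& (1 <<< i) != 0 then ['.'] else []) ++ [cs.getD (i + 1) ' ']) := by
  unfold gdsBuild
  rw [show (fun (dotted : List Char) (i : Nat) =>
        (if mask &&& (1 <<< i) != 0 then dotted ++ ['.'] else dotted) ++ [cs.getD (i + 1) ' '])
      = (fun (dotted : List Char) (i : Nat) =>
        dotted ++ ((if mask &&& (1 <<< i) != 0 then ['.'] else []) ++ [cs.getD (i + 1) ' '])) from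
    funext fun _ => funext fun _ => by split <;> simp]
  exact PySem.List.foldl_append_eq_flatMap _ _ _

theorem gdsBuild_singleton (c : Char) (mask : Nat) : gdsBuild [c] mask = [c] := by
  simp [gdsBuild]

theorem gdsBuild_cons (c d : Char) (t : List Char) (m : Nat) :
    gdsBuild (c :: d :: t) m
      = c :: ((if m % 2 = 1 then ['.'] else []) ++ gdsBuild (d :: t) (m / 2)) := by
  rw [gdsBuild_flat, gdsBuild_flat]
  simp only [List.length_cons, Nat.add_sub_cancel, List.take_succ_cons, List.take_zero]
  rw [List.range_succ_eq_map, List.flatMap_cons, List.flatMap_map]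
  rw [List.flatMap_congr (g := fun i =>
        (if (m / 2) &&& (1 <<< i) != 0 then ['.'] else []) ++ [(d :: t).getD (i + 1) ' '])
      (fun i _ => by
        simp only [Nat.succ_eq_add_one, gds_bit, Nat.testBit_add_one]
        rfl)]
  simp [gds_bit]

-- membership characterisation of B's variant set in terms of A's mask builder
theorem gdsVariants_mem : ∀ (cs : List Char), cs ≠ [] →
    ∀ l, l ∈ gdsVariants cs ↔ ∃ m, m < 2 ^ (cs.length - 1) ∧ l = gdsBuild cs m
  | [], h, _ => absurd rfl h
  | [c], _, l => by
    rw [show gdsVariants [c] = PySem.Set.ofList [[c]] from rfl, PySem.Set.mem_ofList]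
    simp only [List.mem_singleton, List.length_cons, List.length_nil]
    constructor
    · rintro rfl; exact ⟨0, by norm_num, (gdsBuild_singleton c 0).symm⟩
    · rintro ⟨m, _, rfl⟩; exact gdsBuild_singleton c m
  | c :: d :: t, _, l => by
    have ih := gdsVariants_mem (d :: t) (by simp)
    have hK : 0 < 2 ^ t.length := Nat.two_pow_pos _
    rw [show gdsVariants (c :: d :: t)
        = PySem.Set.union (PySem.Set.ofList ((gdsVariants (d :: t)).map (fun r => c :: r)))
            ((gdsVariants (d :: t)).map (fun r => c :: '.' :: r)) from rfl,
      PySem.Set.mem_union, PySem.Set.mem_ofList]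
    simp only [List.mem_map, List.length_cons, Nat.add_sub_cancel, pow_succ] at *
    constructor
    · rintro (⟨r, hr, rfl⟩ | ⟨r, hr, rfl⟩)
      · obtain ⟨q, hq, rfl⟩ := (ih r).mp hr
        exact ⟨2 * q, by omega, by rw [gdsBuild_cons]; simp [Nat.mul_mod_right,
          Nat.mul_div_cancel_left q (by norm_num : 0 < 2)]⟩
      · obtain ⟨q, hq, rfl⟩ := (ih r).mp hr
        refine ⟨2 * q + 1, by omega, ?_⟩
        rw [gdsBuild_cons]
        have h1 : (2 * q + 1) % 2 = 1 := by omega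
        have h2 : (2 * q + 1) / 2 = q := by omega
        simp [h1, h2]
    · rintro ⟨m, hm, rfl⟩
      have hq : m / 2 < 2 ^ t.length := by omega
      rcases Nat.mod_two_eq_zero_or_one m with h | h
      · exact Or.inl ⟨gdsBuild (d :: t) (m / 2), (ih _).mpr ⟨m / 2, hq, rfl⟩,
          by rw [gdsBuild_cons]; simp [h]⟩
      · exact Or.inr ⟨gdsBuild (d :: t) (m / 2), (ih _).mpr ⟨m / 2, hq, rfl⟩,
          by rw [gdsBuild_cons]; simp [h]⟩

theorem gdsVariants_nodup : ∀ (cs : List Char), List.Nodup (gdsVariants cs)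
  | [] => List.nodup_nil
  | [_] => PySem.Set.nodup_ofList _
  | _ :: _ :: _ => PySem.Set.nodup_union _ _ (PySem.Set.nodup_ofList _)

-- ===== VERDICT (by name: the statement is the Claim_ definition above) =====
theorem generate_dot_suffixes_spec : Claim_equal_generate_dot_suffixes := by
  intro u _ hpre
  unfold Spec_generate_dot_suffixes generate_dot_suffixes generate_dot_suffixes_alt
  have hne : u.toList ≠ [] := by
    intro h
    exact hpre (String.toList_inj.mp (by simpa using h))
  show PySem.List.sorted ((List.range (1 <<< (u.toList.length - 1))).foldl
      (fun res mask => PySem.Set.add res (String.ofList (gdsBuild u.toList mask)))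
      PySem.Set.empty) (fun x => x)
    = PySem.List.sorted ((gdsVariants u.toList).map (fun r => String.ofList r)) (fun x => x)
  -- A's fold of Set.add is Set.ofList of the mapped range
  rw [show ((List.range (1 <<< (u.toList.length - 1))).foldl
        (fun res mask => PySem.Set.add res (String.ofList (gdsBuild u.toList mask))) PySem.Set.empty)
      = PySem.Set.ofList ((List.range (1 <<< (u.toList.length - 1))).map
          (fun mask => String.ofList (gdsBuild u.toList mask))) from by
    rw [PySem.Set.ofList_eq_foldl, List.foldl_map]; rfl]
  apply PySem.List.sorted_eq_sorted_of_perm _ _ _ (fun a b h => h)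
  apply (List.perm_ext_iff_of_nodup (PySem.Set.nodup_ofList _)
    ((gdsVariants_nodup u.toList).map (fun a b h => String.ofList_inj.mp h))).mpr
  intro x
  rw [PySem.Set.mem_ofList]
  simp only [List.mem_map, List.mem_range]
  constructor
  · rintro ⟨m, hm, rfl⟩
    exact ⟨gdsBuild u.toList m, (gdsVariants_mem _ hne _).mpr
      ⟨m, by simpa [Nat.shiftLeft_eq] using hm, rfl⟩, rfl⟩
  · rintro ⟨l, hl, rfl⟩
    obtain ⟨m, hm, rfl⟩ := (gdsVariants_mem _ hne _).mp hl
    exact ⟨m, by simpa [Nat.shiftLeft_eq] using hm, rfl⟩
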